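-- pv_equiv track=rewrite | github.com/aarmijo/bolueta-chatbot | app/api/routers/chat.py | combine_ha_entities_with_descriptions
-- ===== SOURCE A (Python) =====
-- def combine_ha_entities_with_descriptions(entities, descriptions):
--     description_dict = {desc["entity_id"]: desc["entity_description"] for desc in descriptions}
--     combined = []
--     for entity in entities:
--         entity_id = entity["entity_id"]
--         if entity_id in description_dict:
--             combined_entity = entity.copy()
--             combined_entity["entity_description"] = description_dict[entity_id]
--             combined.append(combined_entity)
--     return combined
-- ===== SOURCE B (Python) =====
-- def combine_ha_entities_with_descriptions(entities, descriptions):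
--     combined = []
--     for entity in entities:
--         entity_id = entity["entity_id"]
--         found = False
--         value = None
--         for desc in descriptions:
--             if desc["entity_id"] == entity_id:
--                 found = True
--                 value = desc["entity_description"]
--         if found:
--             combined_entity = entity.copy()
--             combined_entity["entity_description"] = value
--             combined.append(combined_entity)
--     return combined
-- ===== Notes on version B (the rewrite author's own statement) =====
-- stated objective: alternative
-- what changed: B drops A's precomputed id->description dict and instead scans all descriptions per entity with a found-flag, keeping the last matching description (matching dict overwrite semantics).
import Mathlib
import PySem

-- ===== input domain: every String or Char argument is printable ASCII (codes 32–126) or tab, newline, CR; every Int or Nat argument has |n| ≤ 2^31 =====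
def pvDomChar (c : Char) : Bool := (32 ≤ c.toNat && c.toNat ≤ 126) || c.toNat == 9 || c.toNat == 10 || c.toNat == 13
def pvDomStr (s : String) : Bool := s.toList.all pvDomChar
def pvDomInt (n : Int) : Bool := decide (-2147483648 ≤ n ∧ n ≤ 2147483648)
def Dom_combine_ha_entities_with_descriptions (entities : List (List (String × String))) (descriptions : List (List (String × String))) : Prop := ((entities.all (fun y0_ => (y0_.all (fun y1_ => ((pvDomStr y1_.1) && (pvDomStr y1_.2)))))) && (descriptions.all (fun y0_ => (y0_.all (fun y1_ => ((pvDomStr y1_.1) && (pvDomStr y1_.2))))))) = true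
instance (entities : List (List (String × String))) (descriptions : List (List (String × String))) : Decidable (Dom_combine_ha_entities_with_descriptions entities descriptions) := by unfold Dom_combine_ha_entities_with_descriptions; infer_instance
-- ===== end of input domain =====

-- B replaces A's precomputed id→description dict by a per-entity scan of all descriptions
-- keeping the LAST match (alternative decomposition, not faster: O(n·m) vs A's O(n+m)).

-- ===== PORT A =====
-- dict comprehension over descriptions, then a filtered loop over entities.
-- desc["k"] / entity["k"] is Dict.getD with a dummy default: Pre_ guarantees the key is
-- present, so the default is never used (Python raises KeyError exactly outside Pre_).
def combine_ha_entities_with_descriptions (entities : List (List (String × String))) (descriptions : List (List (String × String))) : List (List (String × String)) :=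
  let description_dict : PySem.Dict String String :=
    descriptions.foldl (fun d desc =>
      d.insert ((PySem.Dict.mk desc).getD "entity_id" "")
               ((PySem.Dict.mk desc).getD "entity_description" "")) PySem.Dict.empty
  entities.foldl (fun combined entity =>
    let entity_id := (PySem.Dict.mk entity).getD "entity_id" ""
    if description_dict.contains entity_id then
      combined ++ [((PySem.Dict.mk entity).insert "entity_description" (description_dict.getD entity_id "")).items]
    else combined) []

-- ===== PORT B =====
def combine_ha_entities_with_descriptions_alt (entities : List (List (String × String))) (descriptions : List (List (String × String))) : List (List (String × String)) :=
  entities.foldl (fun combined entity =>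
    let entity_id := (PySem.Dict.mk entity).getD "entity_id" ""
    let st : Bool × String :=
      descriptions.foldl (fun st desc =>
        if ((PySem.Dict.mk desc).getD "entity_id" "") == entity_id then
          (true, (PySem.Dict.mk desc).getD "entity_description" "")
        else st) (false, "")
    if st.1 then
      combined ++ [((PySem.Dict.mk entity).insert "entity_description" st.2).items]
    else combined) []

-- ===== PRECONDITION & SPEC =====
-- Pre_ excludes exactly the inputs where the Python A raises KeyError: an entity without
-- an "entity_id" key, or a description without "entity_id" or "entity_description".
def Pre_combine_ha_entities_with_descriptions (entities : List (List (String × String))) (descriptions : List (List (String × String))) : Prop :=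
  ((entities.all fun e => (PySem.Dict.mk e).contains "entity_id") &&
   (descriptions.all fun d => (PySem.Dict.mk d).contains "entity_id" &&
                              (PySem.Dict.mk d).contains "entity_description")) = true
instance (entities : List (List (String × String))) (descriptions : List (List (String × String))) : Decidable (Pre_combine_ha_entities_with_descriptions entities descriptions) := by unfold Pre_combine_ha_entities_with_descriptions; infer_instance

def pvWitness_combine_ha_entities_with_descriptions : (List (List (String × String))) × (List (List (String × String))) :=
  ([[("entity_id", "a")], [("entity_id", "b"), ("x", "y")]],
   [[("entity_id", "a"), ("entity_description", "first")], [("entity_id", "a"), ("entity_description", "second")]])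

def Spec_combine_ha_entities_with_descriptions (entities : List (List (String × String))) (descriptions : List (List (String × String))) (out : List (List (String × String))) : Prop := out = combine_ha_entities_with_descriptions_alt entities descriptions
instance (entities : List (List (String × String))) (descriptions : List (List (String × String))) (out : List (List (String × String))) : Decidable (Spec_combine_ha_entities_with_descriptions entities descriptions out) := by unfold Spec_combine_ha_entities_with_descriptions; infer_instance

-- ===== CLAIM (what is proved, stated in full; the proofs are below) =====
def Claim_equal_combine_ha_entities_with_descriptions : Prop := ∀ (entities : List (List (String × String))) (descriptions : List (List (String × String))), Dom_combine_ha_entities_with_descriptions entities descriptions → Pre_combine_ha_entities_with_descriptions entities descriptions → Spec_combine_ha_entities_with_descriptions entities descriptions (combine_ha_entities_with_descriptions entities descriptions)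

-- ===== LEMMAS AND PROOFS =====

-- last matching description's value, threaded through an accumulator (proof helper)
def pvLm (descriptions : List (List (String × String))) (k : String) (a : Option String) : Option String :=
  descriptions.foldl (fun acc desc =>
    if ((PySem.Dict.mk desc).getD "entity_id" "") == k then
      some ((PySem.Dict.mk desc).getD "entity_description" "")
    else acc) a

theorem pvLm_acc (descriptions : List (List (String × String))) (k : String) (a : Option String) :
    pvLm descriptions k a = match pvLm descriptions k none with
      | some v => some v
      | none => a := by
  induction descriptions generalizing a with
  | nil => rfl
  | cons d rest ih =>
    have e : ∀ a : Option String, pvLm (d :: rest) k a =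
        pvLm rest k (if (((PySem.Dict.mk d).getD "entity_id" "") == k) = true then
          some ((PySem.Dict.mk d).getD "entity_description" "") else a) := fun _ => rfl
    rw [e, e]
    by_cases h : (((PySem.Dict.mk d).getD "entity_id" "") == k) = true
    · simp only [if_pos h]
      rw [ih (some _)]
      cases pvLm rest k none <;> rfl
    · simp only [if_neg h]
      exact ih a

theorem pvA_get (descriptions : List (List (String × String))) (d : PySem.Dict String String) (k : String) :
    (descriptions.foldl (fun d desc =>
      d.insert ((PySem.Dict.mk desc).getD "entity_id" "")
               ((PySem.Dict.mk desc).getD "entity_description" "")) d).get? k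
    = match pvLm descriptions k none with
      | some v => some v
      | none => d.get? k := by
  induction descriptions generalizing d with
  | nil => rfl
  | cons desc rest ih =>
    have e : pvLm (desc :: rest) k none =
        pvLm rest k (if (((PySem.Dict.mk desc).getD "entity_id" "") == k) = true then
          some ((PySem.Dict.mk desc).getD "entity_description" "") else none) := rfl
    rw [List.foldl_cons, ih, e]
    by_cases h : (((PySem.Dict.mk desc).getD "entity_id" "") == k) = true
    · have hk : ((PySem.Dict.mk desc).getD "entity_id" "") = k := beq_iff_eq.mp h
      simp only [if_pos h]
      rw [hk, PySem.Dict.get?_insert_self,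
        pvLm_acc rest k (some ((PySem.Dict.mk desc).getD "entity_description" ""))]
      cases pvLm rest k none <;> rfl
    · have hk : k ≠ ((PySem.Dict.mk desc).getD "entity_id" "") := by
        intro hkk; exact h (beq_iff_eq.mpr hkk.symm)
      simp only [if_neg h]
      rw [PySem.Dict.get?_insert_of_ne _ _ hk]

theorem pvB_fold (descriptions : List (List (String × String))) (k : String) (st : Bool × String) :
    descriptions.foldl (fun st desc =>
      if (((PySem.Dict.mk desc).getD "entity_id" "") == k) = true then
        (true, (PySem.Dict.mk desc).getD "entity_description" "")
      else st) st
    = match pvLm descriptions k none with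
      | some v => (true, v)
      | none => st := by
  induction descriptions generalizing st with
  | nil => rfl
  | cons desc rest ih =>
    have e : pvLm (desc :: rest) k none =
        pvLm rest k (if (((PySem.Dict.mk desc).getD "entity_id" "") == k) = true then
          some ((PySem.Dict.mk desc).getD "entity_description" "") else none) := rfl
    rw [List.foldl_cons, ih, e]
    by_cases h : (((PySem.Dict.mk desc).getD "entity_id" "") == k) = true
    · simp only [if_pos h]
      rw [pvLm_acc rest k (some ((PySem.Dict.mk desc).getD "entity_description" ""))]
      cases pvLm rest k none <;> rfl
    · simp only [if_neg h]

-- the two per-entity step functions (proof helpers)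
def pvStepA (descriptions : List (List (String × String))) (combined : List (List (String × String))) (entity : List (String × String)) : List (List (String × String)) :=
  let description_dict : PySem.Dict String String :=
    descriptions.foldl (fun d desc =>
      d.insert ((PySem.Dict.mk desc).getD "entity_id" "")
               ((PySem.Dict.mk desc).getD "entity_description" "")) PySem.Dict.empty
  let entity_id := (PySem.Dict.mk entity).getD "entity_id" ""
  if description_dict.contains entity_id then
    combined ++ [((PySem.Dict.mk entity).insert "entity_description" (description_dict.getD entity_id "")).items]
  else combined

def pvStepB (descriptions : List (List (String × String))) (combined : List (List (String × String))) (entity : List (String × String)) : List (List (String × String)) :=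
  let entity_id := (PySem.Dict.mk entity).getD "entity_id" ""
  let st : Bool × String :=
    descriptions.foldl (fun st desc =>
      if ((PySem.Dict.mk desc).getD "entity_id" "") == entity_id then
        (true, (PySem.Dict.mk desc).getD "entity_description" "")
      else st) (false, "")
  if st.1 then
    combined ++ [((PySem.Dict.mk entity).insert "entity_description" st.2).items]
  else combined

theorem pvStep_eq (descriptions : List (List (String × String))) (c : List (List (String × String))) (e : List (String × String)) :
    pvStepA descriptions c e = pvStepB descriptions c e := by
  simp only [pvStepA, pvStepB]
  generalize (PySem.Dict.mk e).getD "entity_id" "" = k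
  have hA := pvA_get descriptions PySem.Dict.empty k
  rw [pvB_fold descriptions k (false, "")]
  cases hlm : pvLm descriptions k none with
  | none =>
    rw [hlm] at hA
    simp only [PySem.Dict.get?_empty] at hA
    rw [PySem.Dict.contains_eq_isSome_get?, hA]
    rfl
  | some v =>
    rw [hlm] at hA
    rw [PySem.Dict.contains_eq_isSome_get?, PySem.Dict.getD_eq_get?_getD, hA]
    rfl

-- ===== VERDICT (by name: the statement is the Claim_ definition above) =====
theorem combine_ha_entities_with_descriptions_spec : Claim_equal_combine_ha_entities_with_descriptions := by
  intro entities descriptions _ _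
  show combine_ha_entities_with_descriptions entities descriptions = combine_ha_entities_with_descriptions_alt entities descriptions
  show List.foldl (pvStepA descriptions) [] entities = List.foldl (pvStepB descriptions) [] entities
  rw [funext fun c => funext fun e => pvStep_eq descriptions c e]
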